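-- pv_equiv track=rewrite | github.com/HansongProgramming/Automations | Assessment Report Generator/app/analyzer/credit_analyzer.py | _group_accounts_by_lender
-- ===== SOURCE A (Python) =====
-- from typing import Dict, List, Any
-- from collections import defaultdict
--
-- def _group_accounts_by_lender(accounts: List[Dict]) -> Dict[str, List[Dict]]:
--     """Group accounts by lender, filtering out 'Unknown' lenders"""
--     grouped = defaultdict(list)
--
--     for account in accounts:
--         lender = account.get('lender', 'Unknown').strip()
--         # Skip accounts with unknown lenders
--         if lender.upper() == 'UNKNOWN' or not lender:
--             continue
--         grouped[lender].append(account)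
--
--     return dict(grouped)
-- ===== SOURCE B (Python) =====
-- def _group_accounts_by_lender(accounts):
--     """Group accounts by lender, filtering out 'Unknown' lenders"""
--     pairs = []
--     for account in accounts:
--         lender = account.get('lender', 'Unknown').strip()
--         if lender.upper() != 'UNKNOWN' and lender:
--             pairs.append((lender, account))
--     lenders = list(dict.fromkeys(lender for lender, _ in pairs))
--     return {lender: [acc for l, acc in pairs if l == lender] for lender in lenders}
-- ===== Notes on version B (the rewrite author's own statement) =====
-- stated objective: alternative
-- what changed: Replaces the running defaultdict with a filter-first pipeline: build the surviving (lender, account) pairs in one pass, dedup the lenders in first-appearance order via dict.fromkeys, then emit each group with a per-lender comprehension over the pair list.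
import Mathlib
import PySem

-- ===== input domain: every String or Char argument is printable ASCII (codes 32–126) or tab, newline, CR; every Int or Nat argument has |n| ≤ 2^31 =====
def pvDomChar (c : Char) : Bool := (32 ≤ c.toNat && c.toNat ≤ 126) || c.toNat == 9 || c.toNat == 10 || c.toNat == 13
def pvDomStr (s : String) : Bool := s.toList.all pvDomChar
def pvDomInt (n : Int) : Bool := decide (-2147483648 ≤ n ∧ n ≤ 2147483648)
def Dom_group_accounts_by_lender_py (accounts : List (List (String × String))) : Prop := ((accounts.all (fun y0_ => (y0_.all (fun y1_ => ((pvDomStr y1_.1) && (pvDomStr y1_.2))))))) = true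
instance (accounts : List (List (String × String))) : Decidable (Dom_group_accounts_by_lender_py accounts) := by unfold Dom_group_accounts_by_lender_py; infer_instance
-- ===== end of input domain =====

-- B replaces A's running defaultdict with a filter-first pipeline (surviving pairs, ordered
-- dedup of lenders, one comprehension per lender); alternative decomposition, same results.

-- ===== PORT A =====
def group_accounts_by_lender_py (accounts : List (List (String × String))) :
    List (String × List (List (String × String))) :=
  (accounts.foldl (fun grouped account =>
      let lender := PySem.Str.strip (PySem.Dict.getD (PySem.Dict.mk account) "lender" "Unknown")
      if PySem.Str.upper lender = "UNKNOWN" ∨ lender = "" then grouped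
      else grouped.modify lender [] (fun v => v ++ [account]))
    PySem.Dict.empty).items

-- ===== PORT B =====
def group_accounts_by_lender_py_alt (accounts : List (List (String × String))) :
    List (String × List (List (String × String))) :=
  let pairs := accounts.foldl (fun pairs account =>
      let lender := PySem.Str.strip (PySem.Dict.getD (PySem.Dict.mk account) "lender" "Unknown")
      if ¬ PySem.Str.upper lender = "UNKNOWN" ∧ ¬ lender = "" then pairs ++ [(lender, account)]
      else pairs) []
  let lenders := PySem.List.dedup (pairs.map (fun p => p.1))
  lenders.map (fun l => (l, (pairs.filter (fun p => p.1 == l)).map (fun p => p.2)))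

-- ===== PRECONDITION & SPEC =====
def Spec_group_accounts_by_lender_py (accounts : List (List (String × String))) (out : List (String × List (List (String × String)))) : Prop := out = group_accounts_by_lender_py_alt accounts
instance (accounts : List (List (String × String))) (out : List (String × List (List (String × String)))) : Decidable (Spec_group_accounts_by_lender_py accounts out) := by unfold Spec_group_accounts_by_lender_py; infer_instance

-- ===== CLAIM (what is proved, stated in full; the proofs are below) =====
def Claim_equal_group_accounts_by_lender_py : Prop := ∀ (accounts : List (List (String × String))), Dom_group_accounts_by_lender_py accounts → Spec_group_accounts_by_lender_py accounts (group_accounts_by_lender_py accounts)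

-- ===== LEMMAS AND PROOFS =====

-- the stripped lender key of one account
def pvKey (a : List (String × String)) : String :=
  PySem.Str.strip (PySem.Dict.getD (PySem.Dict.mk a) "lender" "Unknown")

-- whether the account survives the filter
def pvKeep (a : List (String × String)) : Bool :=
  decide (¬ PySem.Str.upper (pvKey a) = "UNKNOWN" ∧ ¬ pvKey a = "")

-- the surviving (lender, account) pairs, in input order
def pvPairs (accounts : List (List (String × String))) : List (String × List (String × String)) :=
  (accounts.filter pvKeep).map (fun a => (pvKey a, a))

-- B's first loop builds exactly pvPairs
theorem pvPairs_eq (accounts : List (List (String × String)))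
    (acc : List (String × List (String × String))) :
    accounts.foldl (fun pairs account =>
      if ¬ PySem.Str.upper (pvKey account) = "UNKNOWN" ∧ ¬ pvKey account = ""
      then pairs ++ [(pvKey account, account)] else pairs) acc = acc ++ pvPairs accounts := by
  induction accounts generalizing acc with
  | nil => simp [pvPairs]
  | cons a rest ih =>
    simp only [List.foldl_cons]
    by_cases h : ¬ PySem.Str.upper (pvKey a) = "UNKNOWN" ∧ ¬ pvKey a = ""
    · rw [if_pos h, ih]
      have hk : pvKeep a = true := by simp only [pvKeep]; exact decide_eq_true h
      simp [pvPairs, hk]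
    · rw [if_neg h, ih]
      have hk : pvKeep a = false := by simp only [pvKeep]; exact decide_eq_false h
      simp [pvPairs, hk]

-- A's loop is the unconditional grouping fold over pvPairs
theorem pvFoldA_eq (accounts : List (List (String × String)))
    (d : PySem.Dict String (List (List (String × String)))) :
    accounts.foldl (fun grouped account =>
      if PySem.Str.upper (pvKey account) = "UNKNOWN" ∨ pvKey account = "" then grouped
      else grouped.modify (pvKey account) [] (fun v => v ++ [account])) d
    = (pvPairs accounts).foldl (fun d p => d.modify p.1 [] (fun v => v ++ [p.2])) d := by
  induction accounts generalizing d with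
  | nil => simp [pvPairs]
  | cons a rest ih =>
    simp only [List.foldl_cons]
    by_cases h : PySem.Str.upper (pvKey a) = "UNKNOWN" ∨ pvKey a = ""
    · rw [if_pos h, ih]
      have hk : pvKeep a = false := by
        simp only [pvKeep]
        exact decide_eq_false (fun hc => h.elim (fun h1 => hc.1 h1) (fun h2 => hc.2 h2))
      simp [pvPairs, hk]
    · rw [if_neg h, ih]
      have hk : pvKeep a = true := by
        simp only [pvKeep]
        exact decide_eq_true ⟨fun h1 => h (Or.inl h1), fun h2 => h (Or.inr h2)⟩
      simp [pvPairs, hk]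

-- ===== VERDICT (by name: the statement is the Claim_ definition above) =====
theorem group_accounts_by_lender_py_spec : Claim_equal_group_accounts_by_lender_py := by
  intro accounts _
  show group_accounts_by_lender_py accounts = group_accounts_by_lender_py_alt accounts
  have hA : group_accounts_by_lender_py accounts
      = ((pvPairs accounts).foldl (fun d p => d.modify p.1 [] (fun v => v ++ [p.2]))
          PySem.Dict.empty).items :=
    congrArg PySem.Dict.items (pvFoldA_eq accounts PySem.Dict.empty)
  have hB : group_accounts_by_lender_py_alt accounts
      = (PySem.List.dedup ((pvPairs accounts).map (fun p => p.1))).map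
          (fun l => (l, ((pvPairs accounts).filter (fun p => p.1 == l)).map (fun p => p.2))) := by
    have h1 := pvPairs_eq accounts []
    show (PySem.List.dedup ((accounts.foldl (fun pairs account =>
          if ¬ PySem.Str.upper (pvKey account) = "UNKNOWN" ∧ ¬ pvKey account = ""
          then pairs ++ [(pvKey account, account)] else pairs) []).map (fun p => p.1))).map
        (fun l => (l, ((accounts.foldl (fun pairs account =>
          if ¬ PySem.Str.upper (pvKey account) = "UNKNOWN" ∧ ¬ pvKey account = ""
          then pairs ++ [(pvKey account, account)] else pairs) []).filter (fun p => p.1 == l)).map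
            (fun p => p.2))) = _
    rw [h1]
    simp
  rw [hA, hB]
  set ps := pvPairs accounts with hps
  have hnd : ((ps.foldl (fun d p => d.modify p.1 [] (fun v => v ++ [p.2]))
      PySem.Dict.empty).keys).Nodup :=
    PySem.Dict.nodup_keys_foldl_modify_key ps (fun p => p.1) [] (fun _ p v => v ++ [p.2])
      PySem.Dict.empty (by rw [PySem.Dict.keys_empty]; exact List.nodup_nil)
  have hkeys : (ps.foldl (fun d p => d.modify p.1 [] (fun v => v ++ [p.2]))
      PySem.Dict.empty).keys = PySem.List.dedup (ps.map (fun p => p.1)) := by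
    have h := PySem.Dict.keys_foldl_modify_key ps (fun p => p.1) [] (fun _ p v => v ++ [p.2])
      PySem.Dict.empty
    rw [PySem.Dict.keys_empty] at h
    exact h
  have hitems := PySem.Dict.items_eq_map_keys
      (ps.foldl (fun d p => d.modify p.1 [] (fun v => v ++ [p.2])) PySem.Dict.empty) hnd []
  rw [hitems, hkeys]
  refine List.map_congr_left ?_
  intro l _
  have hg := PySem.Dict.getD_foldl_modify_append ps PySem.Dict.empty l
  simp [hg, PySem.Dict.getD_empty]
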